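-- pv_equiv track=rewrite | github.com/ArthurBoaro/my-daily-coding-challenge-fcc | March 5, 2026.py | smallest_gap
-- ===== SOURCE A (Python) =====
-- def smallest_gap(s):
--
--     lastSeen = {}
--     result = {}
--     minDistance = 10000000000
--
--     for i in range(len(s)):
--         char = s[i]
--
--         if (char in lastSeen):
--             distance = i - lastSeen[char]
--
--             if (distance < minDistance):
--                 minDistance = distance
--                 result = {
--                     "minChar": char,
--                     "positions": [lastSeen[char], i],
--                     "distance": distance
--                 }
--         lastSeen[char] = i
--
--     return s[result["positions"][0] + 1 : result["positions"][1]]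
-- ===== SOURCE B (Python) =====
-- def smallest_gap(s):
--     # Group indices by character, then scan each character's consecutive
--     # occurrence pairs, keeping the lexicographically smallest (gap, right index).
--     positions = {}
--     for i, ch in enumerate(s):
--         positions.setdefault(ch, []).append(i)
--     best = None
--     for ps in positions.values():
--         for prev, cur in zip(ps, ps[1:]):
--             cand = (cur - prev, cur)
--             if best is None or cand < best:
--                 best = cand
--     if best is None:
--         return ""
--     gap, r = best
--     return s[r - gap + 1:r]
-- ===== Notes on version B (the rewrite author's own statement) =====
-- stated objective: alternative
-- what changed: Instead of a single online pass keeping a last-seen dict and a running minimum, B first groups all indices by character into a positions dict, then scans each character's consecutive occurrence pairs, taking the lexicographic minimum of (gap, right index).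
import Mathlib
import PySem

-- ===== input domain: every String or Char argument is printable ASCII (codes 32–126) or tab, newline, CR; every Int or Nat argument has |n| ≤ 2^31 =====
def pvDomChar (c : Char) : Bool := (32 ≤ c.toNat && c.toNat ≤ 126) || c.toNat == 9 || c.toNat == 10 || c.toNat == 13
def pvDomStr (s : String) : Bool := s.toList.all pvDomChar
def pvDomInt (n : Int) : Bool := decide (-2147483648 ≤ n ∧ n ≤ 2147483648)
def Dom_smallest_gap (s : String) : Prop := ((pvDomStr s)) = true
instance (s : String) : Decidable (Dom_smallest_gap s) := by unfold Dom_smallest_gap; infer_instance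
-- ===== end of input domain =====

-- B regroups the work: one pass building a character → index-list dict, then a scan of each
-- character's consecutive occurrence pairs taking the lexicographic minimum of (gap, right index);
-- same cost, genuinely different traversal (objective: alternative).

-- ===== PORT A =====
-- the body of A's 'for i in range(len(s))' loop, named so the proofs can speak about it
def stepA (s : String) (st : PySem.Dict Char Int × Option (Char × Int × Int × Int) × Int)
    (i : Int) : PySem.Dict Char Int × Option (Char × Int × Int × Int) × Int :=
  match PySem.Str.pyGet? s i with
  | none => st                      -- unreachable: i ∈ range(len(s))
  | some char =>
    let lastSeen := st.1
    let result := st.2.1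
    let minDistance := st.2.2
    let rm :=
      match lastSeen.get? char with
      | some p =>
        let distance := i - p
        if distance < minDistance then (some (char, p, i, distance), distance)
        else (result, minDistance)
      | none => (result, minDistance)
    (lastSeen.insert char i, rm)

def smallest_gap (s : String) : String :=
  let st := (PySem.List.pyRange 0 (PySem.Str.len s)).foldl (stepA s)
    (PySem.Dict.empty, none, 10000000000)
  match st.2.1 with
  | some (_, p0, p1, _) => PySem.Str.slice s (some (p0 + 1)) (some p1)
  | none => ""                      -- Python raises a KeyError here; excluded by Pre_

-- ===== PORT B =====
-- Python's '<' on int pairs (lexicographic)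
def candLt (a b : Int × Int) : Bool := a.1 < b.1 || (a.1 == b.1 && a.2 < b.2)

def smallest_gap_alt (s : String) : String :=
  let positions := (PySem.List.enumerate s.toList).foldl
    (fun (d : PySem.Dict Char (List Int)) p => d.modify p.2 [] (· ++ [p.1])) PySem.Dict.empty
  let best := positions.values.foldl
    (fun best ps => (ps.zip ps.tail).foldl
      (fun (best : Option (Int × Int)) pq =>
        let cand := (pq.2 - pq.1, pq.2)
        match best with
        | none => some cand
        | some b => if candLt cand b then some cand else some b) best) none
  match best with
  | none => ""
  | some (gap, r) => PySem.Str.slice s (some (r - gap + 1)) (some r)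

-- ===== PRECONDITION & SPEC =====
-- Pre_ excludes strings with no repeated character, on which A raises a KeyError
-- (the distance < 10^10 conjunct is A's initial minDistance cap, vacuous for any realistic string).
def Pre_smallest_gap (s : String) : Prop :=
  ∃ j < s.toList.length, ∃ i < j,
    s.toList[i]? = s.toList[j]? ∧ (j : Int) - (i : Int) < 10000000000
instance (s : String) : Decidable (Pre_smallest_gap s) := by unfold Pre_smallest_gap; infer_instance
def pvWitness_smallest_gap : String := "aa"

def Spec_smallest_gap (s : String) (out : String) : Prop := out = smallest_gap_alt s
instance (s : String) (out : String) : Decidable (Spec_smallest_gap s out) := by unfold Spec_smallest_gap; infer_instance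

-- ===== CLAIM (what is proved, stated in full; the proofs are below) =====
def Claim_equal_smallest_gap : Prop := ∀ (s : String), Dom_smallest_gap s → Pre_smallest_gap s → Spec_smallest_gap s (smallest_gap s)

-- ===== LEMMAS AND PROOFS =====

def INF : Int := 10000000000

-- the state kept by B's inner loop, as a binary min
def pmin (b : Option (Int × Int)) (c : Int × Int) : Option (Int × Int) :=
  match b with
  | none => some c
  | some x => if candLt c x then some c else some x

def distO : Option (Int × Int) → Int
  | none => INF
  | some c => c.1

-- the state kept by A's loop, gap-only strict comparison against the running minimum
def pmin' (b : Option (Int × Int)) (c : Int × Int) : Option (Int × Int) :=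
  if c.1 < distO b then some c else b

def lexLe (x d : Int × Int) : Prop := x.1 < d.1 ∨ (x.1 = d.1 ∧ x.2 ≤ d.2)

-- indices of c in cs, increasing
def occN (cs : List Char) (c : Char) : List Nat :=
  (List.range cs.length).filter (fun k => cs[k]? == some c)
def occI (cs : List Char) (c : Char) : List Int := (occN cs c).map (fun (k : Nat) => (k : Int))

-- the previous occurrence of cs[j] before j
def prevN (cs : List Char) (j : Nat) : Option Nat :=
  ((List.range j).filter (fun k => cs[k]? == cs[j]?)).getLast?

-- candidates (gap, right index), in A's order
def candsUpTo (cs : List Char) (i : Nat) : List (Int × Int) :=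
  (List.range i).filterMap (fun j => (prevN cs j).map (fun (p : Nat) => ((j : Int) - (p : Int), (j : Int))))
def candsA (cs : List Char) : List (Int × Int) := candsUpTo cs cs.length

-- candidates in B's order: grouped by character
def pairsOf (l : List Int) : List (Int × Int) :=
  (l.zip l.tail).map (fun pq => (pq.2 - pq.1, pq.2))
def candsB (cs : List Char) : List (Int × Int) :=
  (PySem.Set.ofList cs).flatMap (fun ch => pairsOf (occI cs ch))

def project : Option (Char × Int × Int × Int) → Option (Int × Int) :=
  Option.map (fun t => (t.2.2.1 - t.2.1, t.2.2.1))

lemma candLt_iff (a b : Int × Int) :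
    candLt a b = true ↔ (a.1 < b.1 ∨ (a.1 = b.1 ∧ a.2 < b.2)) := by
  simp [candLt]

-- (1) consecutive pairs of l ++ [a]
lemma zip_tail_append {α : Type} (l : List α) (a : α) :
    (l ++ [a]).zip (l ++ [a]).tail
      = l.zip l.tail ++ (match l.getLast? with | some g => [(g, a)] | none => []) := by
  induction l with
  | nil => simp
  | cons x t ih =>
    cases t with
    | nil => simp
    | cons y t' =>
      simp only [List.cons_append, List.tail_cons, List.zip_cons_cons] at ih ⊢
      rw [ih]
      simp [List.getLast?_cons_cons]

-- (2) consecutive pairs of a filtered range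
lemma mem_zip_tail_filter_range (P : Nat → Bool) (n p q : Nat) :
    ((p, q) ∈ (((List.range n).filter P).zip ((List.range n).filter P).tail))
      ↔ (q < n ∧ P q = true ∧ ((List.range q).filter P).getLast? = some p) := by
  induction n with
  | zero => simp
  | succ n ih =>
    rw [List.range_succ, List.filter_append]
    by_cases hPn : P n
    · rw [show List.filter P [n] = [n] by simp [hPn]]
      rw [zip_tail_append]
      constructor
      · intro h
        rcases List.mem_append.mp h with h1 | h2
        · obtain ⟨hq, hPq, hl⟩ := ih.mp h1
          exact ⟨by omega, hPq, hl⟩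
        · cases hg : (List.filter P (List.range n)).getLast? with
          | none => rw [hg] at h2; simp at h2
          | some g =>
            rw [hg] at h2
            simp only [List.mem_singleton, Prod.mk.injEq] at h2
            obtain ⟨rfl, rfl⟩ := h2
            exact ⟨by omega, hPn, hg⟩
      · rintro ⟨hq, hPq, hl⟩
        rcases Nat.lt_or_ge q n with h | h
        · exact List.mem_append.mpr (Or.inl (ih.mpr ⟨h, hPq, hl⟩))
        · have hqn : q = n := by omega
          subst hqn
          rw [hl]
          simp
    · rw [show List.filter P [n] = [] by simp [hPn], List.append_nil, ih]
      constructor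
      · rintro ⟨hq, hPq, hl⟩
        exact ⟨by omega, hPq, hl⟩
      · rintro ⟨hq, hPq, hl⟩
        have hqn : q ≠ n := by rintro rfl; rw [hPq] at hPn; exact hPn rfl
        exact ⟨by omega, hPq, hl⟩

-- (3) getLast? of a pairwise-< list is maximal
lemma le_getLast?_of_pairwise {l : List Nat} (hp : l.Pairwise (· < ·)) {a g : Nat}
    (ha : a ∈ l) (hg : l.getLast? = some g) : a ≤ g := by
  induction l with
  | nil => simp at ha
  | cons x t ih =>
    cases t with
    | nil =>
      simp at ha hg
      omega
    | cons y t' =>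
      rw [List.getLast?_cons_cons] at hg
      have hgmem : g ∈ y :: t' := List.mem_of_getLast? hg
      rcases List.mem_cons.mp ha with rfl | ha'
      · exact le_of_lt ((List.pairwise_cons.mp hp).1 g hgmem)
      · exact ih (List.pairwise_cons.mp hp).2 ha' hg

-- (4) membership in candsA
lemma mem_candsA (cs : List Char) (c : Int × Int) :
    c ∈ candsA cs ↔ ∃ j p : Nat, j < cs.length ∧ prevN cs j = some p
      ∧ c = ((j : Int) - (p : Int), (j : Int)) := by
  unfold candsA candsUpTo
  rw [List.mem_filterMap]
  constructor
  · rintro ⟨j, hj, hmap⟩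
    obtain ⟨p, hp, hc⟩ := Option.map_eq_some_iff.mp hmap
    exact ⟨j, p, List.mem_range.mp hj, hp, hc.symm⟩
  · rintro ⟨j, p, hj, hp, rfl⟩
    exact ⟨j, List.mem_range.mpr hj, by rw [hp]; rfl⟩

-- (6) membership in candsB is the same
lemma mem_candsB (cs : List Char) (c : Int × Int) :
    c ∈ candsB cs ↔ ∃ j p : Nat, j < cs.length ∧ prevN cs j = some p
      ∧ c = ((j : Int) - (p : Int), (j : Int)) := by
  unfold candsB pairsOf occI occN
  rw [List.mem_flatMap]
  constructor
  · rintro ⟨ch, hch, hc⟩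
    rw [List.mem_map] at hc
    obtain ⟨pq, hpq, rfl⟩ := hc
    rw [← List.map_tail, List.zip_map, List.mem_map] at hpq
    obtain ⟨⟨p, q⟩, hmem, rfl⟩ := hpq
    rw [mem_zip_tail_filter_range] at hmem
    obtain ⟨hq, hPq, hl⟩ := hmem
    refine ⟨q, p, hq, ?_, rfl⟩
    unfold prevN
    rw [show cs[q]? = some ch from by simpa using hPq]
    exact hl
  · rintro ⟨j, p, hj, hp, rfl⟩
    have hjj : cs[j]? = some cs[j] := List.getElem?_eq_getElem hj
    refine ⟨cs[j], ?_, ?_⟩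
    · rw [PySem.Set.mem_ofList]
      exact List.getElem_mem hj
    · rw [List.mem_map]
      refine ⟨((p : Int), (j : Int)), ?_, rfl⟩
      rw [← List.map_tail, List.zip_map, List.mem_map]
      refine ⟨(p, j), ?_, rfl⟩
      rw [mem_zip_tail_filter_range]
      refine ⟨hj, by simp [hjj], ?_⟩
      unfold prevN at hp
      rw [hjj] at hp
      exact hp

-- (11) second components of candsA strictly increase
lemma pairwise_candsA (cs : List Char) :
    (candsA cs).Pairwise (fun c d => c.2 < d.2) := by
  unfold candsA candsUpTo
  refine List.Pairwise.filterMap _ ?_ List.pairwise_lt_range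
  rintro a b hab x hx y hy
  obtain ⟨p, _, rfl⟩ := Option.map_eq_some_iff.mp hx
  obtain ⟨q, _, rfl⟩ := Option.map_eq_some_iff.mp hy
  simpa using hab

-- (5) B's port computes the pmin fold over candsB
lemma B_eq (s : String) :
    smallest_gap_alt s
      = match (candsB s.toList).foldl pmin none with
        | none => ""
        | some x => PySem.Str.slice s (some (x.2 - x.1 + 1)) (some x.2) := by
  simp only [smallest_gap_alt]
  have hswap : (PySem.List.enumerate s.toList).foldl
      (fun (d : PySem.Dict Char (List Int)) p => d.modify p.2 [] (· ++ [p.1])) PySem.Dict.empty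
      = ((PySem.List.enumerate s.toList).map (fun p => (p.2, p.1))).foldl
        (fun (d : PySem.Dict Char (List Int)) p => d.modify p.1 [] (· ++ [p.2])) PySem.Dict.empty := by
    rw [List.foldl_map]
  set D := (PySem.List.enumerate s.toList).foldl
      (fun (d : PySem.Dict Char (List Int)) p => d.modify p.2 [] (· ++ [p.1])) PySem.Dict.empty
    with hDdef
  have hkeys : D.keys = PySem.Set.ofList s.toList := by
    rw [hswap,
      PySem.Dict.keys_foldl_modify_key (β := Char × Int) _ (fun p => p.1) []
        (fun _ p => (· ++ [p.2]))]
    simp [List.map_map, Function.comp_def, PySem.List.map_snd_enumerate,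
      PySem.Dict.keys_empty, PySem.Set.update_nil_left]
  have hnodup : D.keys.Nodup := by
    rw [hswap]
    exact PySem.Dict.nodup_keys_foldl_modify_key (β := Char × Int) _ (fun p => p.1) []
      (fun _ p => (· ++ [p.2])) _ (by simp [PySem.Dict.keys_empty])
  have hgetD : ∀ ch, D.getD ch [] = occI s.toList ch := by
    intro ch
    rw [hswap, PySem.Dict.getD_foldl_modify_append, PySem.Dict.getD_empty]
    rw [PySem.List.enumerate_eq_map_pyRange s.toList 'a']
    simp only [List.map_map, List.filter_map, Function.comp_def]
    rw [PySem.List.len_eq, PySem.List.pyRange_one]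
    simp only [List.filter_map, Function.comp_def, Int.sub_zero,
      Int.toNat_natCast, zero_add, PySem.List.pyGetD_natCast]
    unfold occI occN
    rw [List.filter_congr (q := fun k => s.toList[k]? == some ch) ?_]
    · simp
    · intro k hk
      have hklt : k < s.toList.length := List.mem_range.mp hk
      simp [List.getElem?_eq_getElem hklt]
  have hvalues : D.values = (PySem.Set.ofList s.toList).map (fun ch => occI s.toList ch) := by
    rw [PySem.Dict.values_eq_map_keys D hnodup [], hkeys]
    exact List.map_congr_left fun ch _ => hgetD ch
  rw [hvalues, List.foldl_map]
  have houter : (PySem.Set.ofList s.toList).foldl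
      (fun (b : Option (Int × Int)) ch => ((occI s.toList ch).zip (occI s.toList ch).tail).foldl
        (fun (best : Option (Int × Int)) pq =>
          let cand := (pq.2 - pq.1, pq.2)
          match best with
          | none => some cand
          | some b => if candLt cand b then some cand else some b) b) none
      = (candsB s.toList).foldl pmin none := by
    unfold candsB
    rw [List.foldl_flatMap]
    apply PySem.List.foldl_congr_mem
    intro b ch _
    unfold pairsOf
    rw [List.foldl_map]
    rfl
  rw [houter]
  cases (candsB s.toList).foldl pmin none with
  | none => rfl
  | some x => cases x; rfl

-- (8) A's loop invariant
lemma loopA (s : String) (i : Nat) (hi : i ≤ s.toList.length) :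
    ∃ (d : PySem.Dict Char Int) (r : Option (Char × Int × Int × Int)),
      (PySem.List.pyRange 0 (i : Int)).foldl (stepA s) (PySem.Dict.empty, none, 10000000000)
        = (d, r, distO (project r))
      ∧ (∀ ch : Char, d.get? ch
          = (((List.range i).filter (fun k => s.toList[k]? == some ch)).getLast?).map (fun (p : Nat) => (p : Int)))
      ∧ project r = (candsUpTo s.toList i).foldl pmin' none := by
  induction i with
  | zero =>
    refine ⟨PySem.Dict.empty, none, ?_, ?_, ?_⟩
    · rw [PySem.List.pyRange_one_eq_nil (by norm_num)]
      rfl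
    · intro ch
      simp [PySem.Dict.get?_empty]
    · rfl
  | succ i ih =>
    obtain ⟨d, r, hfold, hdict, hproj⟩ := ih (by omega)
    have hilt : i < s.toList.length := by omega
    have hchar : PySem.Str.pyGet? s ((i : Nat) : Int) = some s.toList[i] := by
      rw [PySem.Str.pyGet?_natCast]
      exact List.getElem?_eq_getElem hilt
    have hgetp : d.get? s.toList[i] = (prevN s.toList i).map (fun (p : Nat) => (p : Int)) := by
      rw [hdict]
      unfold prevN
      rw [List.getElem?_eq_getElem hilt]
    have hrange : PySem.List.pyRange 0 (((i+1) : Nat) : Int)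
        = PySem.List.pyRange 0 ((i : Nat) : Int) ++ [((i : Nat) : Int)] := by
      rw [show (((i+1) : Nat) : Int) = ((i : Nat) : Int) + 1 from by push_cast; ring]
      exact PySem.List.pyRange_one_succ_right (by positivity)
    have hcands : candsUpTo s.toList (i+1) = candsUpTo s.toList i
        ++ ((prevN s.toList i).map (fun (p : Nat) => (((i : Nat) : Int) - (p : Int), ((i : Nat) : Int)))).toList := by
      unfold candsUpTo
      rw [List.range_succ, List.filterMap_append]
      congr 1
    have hdict' : ∀ ch, (d.insert s.toList[i] ((i : Nat) : Int)).get? ch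
        = (((List.range (i+1)).filter (fun k => s.toList[k]? == some ch)).getLast?).map
            (fun (p : Nat) => (p : Int)) := by
      intro ch
      rw [PySem.Dict.get?_insert]
      by_cases hch : ch = s.toList[i]
      · subst hch
        rw [if_pos rfl, List.range_succ, List.filter_append,
          show (List.filter (fun k => s.toList[k]? == some s.toList[i]) [i]) = [i] from by
            simp [List.getElem?_eq_getElem hilt],
          List.getLast?_concat]
        simp
      · rw [if_neg hch, List.range_succ, List.filter_append,
          show (List.filter (fun k => s.toList[k]? == some ch) [i]) = [] from by
            simp [List.getElem?_eq_getElem hilt]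
            exact fun h => absurd h.symm hch,
          List.append_nil, hdict]
    rw [hrange, List.foldl_append, List.foldl_cons, List.foldl_nil, hfold]
    cases hprev : prevN s.toList i with
    | none =>
      refine ⟨d.insert s.toList[i] ((i : Nat) : Int), r, ?_, hdict', ?_⟩
      · simp only [stepA, hchar, hgetp, hprev, Option.map_none]
      · rw [hcands, hprev]
        simpa using hproj
    | some p =>
      by_cases hlt : ((i : Nat) : Int) - (p : Int) < distO (project r)
      · refine ⟨d.insert s.toList[i] ((i : Nat) : Int),
          some (s.toList[i], (p : Int), ((i : Nat) : Int), ((i : Nat) : Int) - (p : Int)),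
          ?_, hdict', ?_⟩
        · simp only [stepA, hchar, hgetp, hprev, Option.map_some]
          rw [if_pos hlt]
          rfl
        · rw [hcands, hprev]
          simp only [Option.map_some, Option.toList]
          rw [List.foldl_append, List.foldl_cons, List.foldl_nil, ← hproj]
          show project (some _) = pmin' (project r) (((i : Nat) : Int) - (p : Int), ((i : Nat) : Int))
          unfold pmin'
          rw [if_pos hlt]
          rfl
      · refine ⟨d.insert s.toList[i] ((i : Nat) : Int), r, ?_, hdict', ?_⟩
        · simp only [stepA, hchar, hgetp, hprev, Option.map_some]
          rw [if_neg hlt]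
        · rw [hcands, hprev]
          simp only [Option.map_some, Option.toList]
          rw [List.foldl_append, List.foldl_cons, List.foldl_nil, ← hproj]
          show project r = pmin' (project r) (((i : Nat) : Int) - (p : Int), ((i : Nat) : Int))
          unfold pmin'
          rw [if_neg hlt]

-- (9) A's port computes the pmin' fold over candsA
lemma A_eq (s : String) :
    smallest_gap s
      = match (candsA s.toList).foldl pmin' none with
        | none => ""
        | some x => PySem.Str.slice s (some (x.2 - x.1 + 1)) (some x.2) := by
  obtain ⟨d, r, hfold, _, hproj⟩ := loopA s s.toList.length (le_refl _)
  simp only [smallest_gap]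
  rw [show PySem.Str.len s = ((s.toList.length : Nat) : Int) from by simp [pysem], hfold]
  show (match r with
    | some (_, p0, p1, _) => PySem.Str.slice s (some (p0 + 1)) (some p1)
    | none => "") = _
  rw [show candsA s.toList = candsUpTo s.toList s.toList.length from rfl, ← hproj]
  cases r with
  | none => rfl
  | some t =>
    obtain ⟨c, p0, p1, dd⟩ := t
    show PySem.Str.slice s (some (p0 + 1)) (some p1)
      = PySem.Str.slice s (some (p1 - (p1 - p0) + 1)) (some p1)
    rw [show p1 - (p1 - p0) + 1 = p0 + 1 from by ring]

-- (10) characterisation of A's fold on a j-increasing candidate list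
lemma Amin (l : List (Int × Int)) (b : Option (Int × Int))
    (hp : l.Pairwise (fun c d => c.2 < d.2))
    (hbj : ∀ x, b = some x → ∀ d ∈ l, x.2 < d.2)
    (hbg : ∀ x, b = some x → x.1 < INF) :
    (∀ x, l.foldl pmin' b = some x →
        x.1 < INF ∧ (b = some x ∨ x ∈ l)
        ∧ (∀ d ∈ l, d.1 < INF → lexLe x d)
        ∧ (∀ y, b = some y → x.1 ≤ y.1))
    ∧ (l.foldl pmin' b = none ↔ (b = none ∧ ∀ d ∈ l, ¬ d.1 < INF)) := by
  induction l using List.reverseRecOn generalizing b with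
  | nil =>
    refine ⟨?_, by simp⟩
    intro x hx
    simp only [List.foldl_nil] at hx
    refine ⟨hbg x hx, Or.inl hx, by simp, ?_⟩
    intro y hy
    rw [hx] at hy
    injection hy with h
    rw [h]
  | append_singleton l d ih =>
    have hpl : l.Pairwise (fun c d => c.2 < d.2) := (List.pairwise_append.mp hp).1
    have hld : ∀ c ∈ l, c.2 < d.2 := fun c hc =>
      (List.pairwise_append.mp hp).2.2 c hc d (by simp)
    have hbj' : ∀ x, b = some x → ∀ e ∈ l, x.2 < e.2 := fun x hx e he =>
      hbj x hx e (List.mem_append_left _ he)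
    obtain ⟨IH1, IH2⟩ := ih b hpl hbj' hbg
    have hdistle : ∀ e ∈ l, e.1 < INF → distO (l.foldl pmin' b) ≤ e.1 := by
      intro e he hei
      cases hq : l.foldl pmin' b with
      | none =>
        exact absurd hei ((IH2.mp hq).2 e he)
      | some z =>
        obtain ⟨_, _, hmin, _⟩ := IH1 z hq
        rcases hmin e he hei with h | h
        · exact le_of_lt h
        · exact le_of_eq h.1
    have hdINF : distO (l.foldl pmin' b) ≤ INF := by
      cases hq : l.foldl pmin' b with
      | none => simp [distO]
      | some z => exact le_of_lt (IH1 z hq).1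
    have hdb : ∀ y, b = some y → distO (l.foldl pmin' b) ≤ y.1 := by
      intro y hy
      cases hq : l.foldl pmin' b with
      | none => exact absurd hy (by rw [(IH2.mp hq).1]; simp)
      | some z => exact (IH1 z hq).2.2.2 y hy
    rw [List.foldl_append, List.foldl_cons, List.foldl_nil]
    constructor
    · intro x hx
      by_cases hlt : d.1 < distO (l.foldl pmin' b)
      · rw [pmin', if_pos hlt] at hx
        obtain rfl : d = x := by injection hx
        refine ⟨lt_of_lt_of_le hlt hdINF, Or.inr (by simp), ?_, ?_⟩
        · intro e he hei
          rcases List.mem_append.mp he with he' | he'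
          · exact Or.inl (lt_of_lt_of_le hlt (hdistle e he' hei))
          · simp only [List.mem_singleton] at he'
            subst he'
            exact Or.inr ⟨rfl, le_refl _⟩
        · intro y hy
          exact le_of_lt (lt_of_lt_of_le hlt (hdb y hy))
      · rw [pmin', if_neg hlt] at hx
        obtain ⟨h1, h2, h3, h4⟩ := IH1 x hx
        refine ⟨h1, ?_, ?_, h4⟩
        · rcases h2 with h2 | h2
          · exact Or.inl h2
          · exact Or.inr (List.mem_append_left _ h2)
        · intro e he hei
          rcases List.mem_append.mp he with he' | he'
          · exact h3 e he' hei
          · simp only [List.mem_singleton] at he'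
            subst he'
            have hx1d : x.1 ≤ e.1 := by
              have := not_lt.mp hlt
              rw [hx] at this
              exact this
            rcases lt_or_eq_of_le hx1d with h | h
            · exact Or.inl h
            · refine Or.inr ⟨h, le_of_lt ?_⟩
              rcases h2 with h2 | h2
              · exact hbj x h2 e (by simp)
              · exact hld x h2
    · by_cases hlt : d.1 < distO (l.foldl pmin' b)
      · rw [pmin', if_pos hlt]
        constructor
        · intro h
          exact absurd h (by simp)
        · rintro ⟨hbn, hall⟩
          exact absurd (lt_of_lt_of_le hlt hdINF) (hall d (by simp))
      · rw [pmin', if_neg hlt]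
        rw [IH2]
        constructor
        · rintro ⟨hbn, hall⟩
          refine ⟨hbn, ?_⟩
          intro e he
          rcases List.mem_append.mp he with he' | he'
          · exact hall e he'
          · simp only [List.mem_singleton] at he'
            subst he'
            intro hd
            apply hlt
            have : distO (l.foldl pmin' b) = INF := by
              rw [IH2.mpr ⟨hbn, hall⟩]
              simp [distO]
            omega
        · rintro ⟨hbn, hall⟩
          exact ⟨hbn, fun e he => hall e (List.mem_append_left _ he)⟩

lemma lexLe_trans {a b c : Int × Int} (h1 : lexLe a b) (h2 : lexLe b c) : lexLe a c := by
  unfold lexLe at *; omega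

lemma pmin_some (b : Option (Int × Int)) (c : Int × Int) :
    ∃ x, pmin b c = some x ∧ lexLe x c ∧ (∀ y, b = some y → lexLe x y) := by
  cases b with
  | none => exact ⟨c, rfl, Or.inr ⟨rfl, le_refl _⟩, by simp⟩
  | some y =>
    by_cases hlt : candLt c y
    · refine ⟨c, by simp [pmin, hlt], Or.inr ⟨rfl, le_refl _⟩, ?_⟩
      rintro y' hy'
      obtain rfl : y = y' := by injection hy'
      rcases (candLt_iff c y).mp hlt with h | h
      · exact Or.inl h
      · exact Or.inr ⟨h.1, le_of_lt h.2⟩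
    · refine ⟨y, by simp [pmin, hlt], ?_, ?_⟩
      · have := (not_iff_not.mpr (candLt_iff c y)).mp (by simpa using hlt)
        unfold lexLe; omega
      · rintro y' hy'
        obtain rfl : y = y' := by injection hy'
        exact Or.inr ⟨rfl, le_refl _⟩

lemma Bfold_le (L : List (Int × Int)) (b : Option (Int × Int)) (y : Int × Int)
    (hb : b = some y) : ∃ x, L.foldl pmin b = some x ∧ lexLe x y := by
  induction L generalizing b y with
  | nil => exact ⟨y, by simpa using hb, Or.inr ⟨rfl, le_refl _⟩⟩
  | cons c' L' ih =>
    obtain ⟨x1, hx1, _, hby⟩ := pmin_some b c'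
    obtain ⟨x, hx, hle⟩ := ih (pmin b c') x1 hx1
    exact ⟨x, hx, lexLe_trans hle (hby y hb)⟩

-- (7) B's fold facts
lemma Bfold_mem (L : List (Int × Int)) (b : Option (Int × Int)) (c : Int × Int)
    (h : L.foldl pmin b = some c) : b = some c ∨ c ∈ L := by
  induction L generalizing b with
  | nil => exact Or.inl h
  | cons c' L' ih =>
    rcases ih (pmin b c') h with h1 | h2
    · cases b with
      | none => exact Or.inr (by simp_all [pmin])
      | some x =>
        by_cases hlt : candLt c' x
        · simp only [pmin, if_pos hlt] at h1
          exact Or.inr (by simp_all)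
        · simp only [pmin, if_neg hlt] at h1
          exact Or.inl h1
    · exact Or.inr (List.mem_cons_of_mem _ h2)

lemma Bfold_min (L : List (Int × Int)) (b : Option (Int × Int)) (d : Int × Int)
    (hd : d ∈ L) : ∃ x, L.foldl pmin b = some x ∧ lexLe x d := by
  induction L generalizing b with
  | nil => simp at hd
  | cons c' L' ih =>
    rcases List.mem_cons.mp hd with rfl | hd'
    · obtain ⟨x1, hx1, hle1, _⟩ := pmin_some b d
      obtain ⟨x, hx, hle⟩ := Bfold_le L' _ x1 hx1
      exact ⟨x, by simpa [hx1] using hx, lexLe_trans hle hle1⟩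
    · exact ih (pmin b c') hd'

-- (12) Pre_ produces a candidate below the cap
lemma pre_cand (s : String) (h : Pre_smallest_gap s) :
    ∃ c ∈ candsA s.toList, c.1 < INF := by
  obtain ⟨j, hj, i, hij, hceq, hgap⟩ := h
  have hi_mem : i ∈ (List.range j).filter (fun k => s.toList[k]? == s.toList[j]?) := by
    rw [List.mem_filter]
    exact ⟨List.mem_range.mpr hij, by simp [hceq]⟩
  have hne : ((List.range j).filter (fun k => s.toList[k]? == s.toList[j]?)).getLast?.isSome := by
    exact List.getLast?_isSome.mpr (List.ne_nil_of_mem hi_mem)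
  obtain ⟨p, hp⟩ := Option.isSome_iff_exists.mp hne
  have hple : i ≤ p :=
    le_getLast?_of_pairwise (List.Pairwise.filter _ List.pairwise_lt_range) hi_mem hp
  refine ⟨((j : Int) - (p : Int), (j : Int)), ?_, ?_⟩
  · rw [mem_candsA]
    exact ⟨j, p, hj, hp, rfl⟩
  · unfold INF
    have h1 : (i : Int) ≤ (p : Int) := by exact_mod_cast hple
    omega

-- ===== VERDICT (by name: the statement is the Claim_ definition above) =====
theorem smallest_gap_spec : Claim_equal_smallest_gap := by
  intro s _ hpre
  unfold Spec_smallest_gap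
  rw [A_eq, B_eq]
  obtain ⟨c0, hc0mem, hc0lt⟩ := pre_cand s hpre
  obtain ⟨AM1, AM2⟩ := Amin (candsA s.toList) none (pairwise_candsA _) (by simp) (by simp)
  cases hqa : (candsA s.toList).foldl pmin' none with
  | none => exact absurd hc0lt ((AM2.mp hqa).2 c0 hc0mem)
  | some x =>
    obtain ⟨hx1, hx2, hx3, _⟩ := AM1 x hqa
    have hxA : x ∈ candsA s.toList := by
      rcases hx2 with h | h
      · simp at h
      · exact h
    have hxB : x ∈ candsB s.toList := (mem_candsB _ _).mpr ((mem_candsA _ _).mp hxA)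
    obtain ⟨y, hy, hyx⟩ := Bfold_min (candsB s.toList) none x hxB
    rw [hy]
    have hyA : y ∈ candsA s.toList := by
      refine (mem_candsA _ _).mpr ((mem_candsB _ _).mp ?_)
      rcases Bfold_mem _ _ _ hy with h | h
      · simp at h
      · exact h
    have hylt : y.1 < INF := by
      unfold lexLe at hyx
      omega
    have hxy := hx3 y hyA hylt
    have hx_eq_y : x = y := by
      obtain ⟨x1, x2⟩ := x
      obtain ⟨y1, y2⟩ := y
      unfold lexLe at hyx hxy
      simp only [Prod.mk.injEq]
      simp only at hyx hxy
      omega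
    rw [hx_eq_y]
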